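-- pv_equiv track=rewrite | github.com/SubarudoDuck/Bee-Trajectory | Ideal_Flower_Location.py | locate_busyb
-- ===== SOURCE A (Python) =====
-- def locate_busyb(flowers, xmax, ymax):
--     """Takes a list of coordinates (tuples) of flowers and the maximum x and y
--     coordinates (integers), go through every square from left to right, upwards
--     towards the final square (xmax, ymax), returns the coordinates (tuple) of
--     the first chosen location (furthest from the other flowers)."""
--     max_val = 0
--     # go through x coordinates before y coordinates to eliminate the need to
--     # use the x + (y * xmax) equation.
--     for y in range(0, ymax + 1):
--         for x in range(0, xmax + 1):
--             # ensure it is in an empty cell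
--             if (x, y) not in flowers:
--                 total = 0
--                 # use the Manhattan distance equation to find total distance
--                 # for each cell
--                 for i in range(0, len(flowers)):
--                     distance = (abs(x - flowers[i][0])
--                                 + abs(y - flowers[i][1]))
--                     total += distance
--                 # return the first flower with the maximum distance
--                 if total > max_val:
--                     max_val = total
--                     closest = (x, y)
--     return closest
-- ===== SOURCE B (Python) =====
-- def locate_busyb(flowers, xmax, ymax):
--     """Same result as A: first grid cell (scan order y outer, x inner) that is
--     not a flower and strictly increases the running max of summed Manhattan
--     distances.  Faster: the distance sum separates into an x-part and a y-part;
--     each axis's sums for all coordinates 0..max are produced by an O(1)-per-step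
--     recurrence fed by a counter dict, and the grid scan uses a set for the
--     occupancy test, so no inner loop over flowers remains."""
--     n = len(flowers)
--     cntx = {}
--     cnty = {}
--     for fx, fy in flowers:
--         cntx[fx] = cntx.get(fx, 0) + 1
--         cnty[fy] = cnty.get(fy, 0) + 1
--
--     def axis_sums(cnt, mx, coords):
--         # sums[x] = sum(abs(x - v) for v in coords) for x in 0..mx
--         s = sum(abs(v) for v in coords)
--         c = sum(1 for v in coords if v <= 0)
--         sums = [s]
--         for x in range(1, mx + 1):
--             s += 2 * c - n
--             sums.append(s)
--             c += cnt.get(x, 0)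
--         return sums
--
--     sx = axis_sums(cntx, xmax, [f[0] for f in flowers])
--     sy = axis_sums(cnty, ymax, [f[1] for f in flowers])
--     occupied = set(flowers)
--     max_val = 0
--     closest = None
--     for y in range(0, ymax + 1):
--         for x in range(0, xmax + 1):
--             if (x, y) not in occupied:
--                 total = sx[x] + sy[y]
--                 if total > max_val:
--                     max_val = total
--                     closest = (x, y)
--     return closest
-- ===== Notes on version B (the rewrite author's own statement) =====
-- stated objective: faster
-- what changed: Instead of summing Manhattan distances over all flowers at every grid cell, B splits the distance sum into an x-part and a y-part, precomputes each axis's sums for 0..max in O(1) per step via the recurrence D(x)=D(x-1)+2*count(v<=x-1)-n fed by a counter dict, and scans the grid once with a set for the occupancy test.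
import Mathlib
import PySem

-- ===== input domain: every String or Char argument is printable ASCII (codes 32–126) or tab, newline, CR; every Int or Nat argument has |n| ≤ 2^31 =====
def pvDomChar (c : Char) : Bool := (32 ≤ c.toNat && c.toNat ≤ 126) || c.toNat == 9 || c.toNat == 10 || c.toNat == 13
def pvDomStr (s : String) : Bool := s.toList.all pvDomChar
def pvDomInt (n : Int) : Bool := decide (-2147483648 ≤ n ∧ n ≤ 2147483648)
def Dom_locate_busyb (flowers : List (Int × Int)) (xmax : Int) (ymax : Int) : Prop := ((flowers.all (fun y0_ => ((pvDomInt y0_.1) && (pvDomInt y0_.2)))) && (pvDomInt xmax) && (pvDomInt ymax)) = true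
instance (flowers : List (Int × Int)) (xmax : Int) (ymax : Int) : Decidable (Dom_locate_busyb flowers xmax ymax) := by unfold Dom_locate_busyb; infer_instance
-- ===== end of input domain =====

-- ===== PORT A =====
-- B changes the algorithm (per-axis distance sums by recurrence + one grid scan) for an asymptotic speed-up; return value only.
def locate_busyb (flowers : List (Int × Int)) (xmax : Int) (ymax : Int) : Int × Int :=
  let fin := (PySem.List.pyRange 0 (ymax + 1) 1).foldl (fun (st : Int × Option (Int × Int)) y =>
    (PySem.List.pyRange 0 (xmax + 1) 1).foldl (fun (st : Int × Option (Int × Int)) x =>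
      if (x, y) ∉ flowers then
        let total := (PySem.List.pyRange 0 (PySem.List.len flowers) 1).foldl
          (fun (total : Int) i =>
            let distance := |x - (PySem.List.pyGetD flowers i (0, 0)).1|
                          + |y - (PySem.List.pyGetD flowers i (0, 0)).2|
            total + distance) 0
        if total > st.1 then (total, some (x, y)) else st
      else st) st) ((0 : Int), (none : Option (Int × Int)))
  -- Python A returns the unbound `closest` (UnboundLocalError) when no update happened; Pre_ excludes that.
  fin.2.getD (0, 0)

-- ===== PORT B =====
-- helper `axis_sums` of Source B: sums[x] = sum(|x - v| for v in coords) for x in 0..mx, by recurrence.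
-- Python's list (O(1) append/index) is ported as Array (push); exact: the list is only appended to and indexed.
def pvAxisSums (cnt : PySem.Dict Int Int) (n : Int) (mx : Int) (coords : List Int) : Array Int :=
  let s0 := (coords.map (fun v => |v|)).sum
  let c0 : Int := (coords.filter (fun v => decide (v ≤ 0))).length
  let st := (PySem.List.pyRange 1 (mx + 1) 1).foldl
    (fun (st : Int × Int × Array Int) x =>
      let s := st.1 + 2 * st.2.1 - n
      (s, st.2.1 + cnt.getD x 0, st.2.2.push s)) (s0, c0, #[s0])
  st.2.2

-- Python's sums[i]; exact for 0 ≤ i < size, the only indices the grid scan produces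
def pvIdx (a : Array Int) (i : Int) : Int := a.getD i.toNat 0

def locate_busyb_alt (flowers : List (Int × Int)) (xmax : Int) (ymax : Int) : Int × Int :=
  let n : Int := PySem.List.len flowers
  let cnts := flowers.foldl (fun (d : PySem.Dict Int Int × PySem.Dict Int Int) f =>
      (d.1.insert f.1 (d.1.getD f.1 0 + 1), d.2.insert f.2 (d.2.getD f.2 0 + 1)))
    (PySem.Dict.empty, PySem.Dict.empty)
  let sx := pvAxisSums cnts.1 n xmax (flowers.map (fun f => f.1))
  let sy := pvAxisSums cnts.2 n ymax (flowers.map (fun f => f.2))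
  let occupied := PySem.Set.ofList flowers
  let fin := (PySem.List.pyRange 0 (ymax + 1) 1).foldl (fun (st : Int × Option (Int × Int)) y =>
    (PySem.List.pyRange 0 (xmax + 1) 1).foldl (fun (st : Int × Option (Int × Int)) x =>
      if (x, y) ∉ occupied then
        let total := pvIdx sx x + pvIdx sy y
        if total > st.1 then (total, some (x, y)) else st
      else st) st) ((0 : Int), (none : Option (Int × Int)))
  -- Python B returns `closest = None` when no update happened; Pre_ excludes that.
  fin.2.getD (0, 0)

-- ===== PRECONDITION & SPEC =====
-- Pre_ excludes exactly the inputs where A's `closest` is never assigned and Python raises UnboundLocalError: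
-- negative xmax/ymax, an empty flower list, or flowers covering every grid cell (no empty cell exists iff the
-- number of DISTINCT in-grid flower cells equals the grid area).  B returns None there.
def Pre_locate_busyb (flowers : List (Int × Int)) (xmax : Int) (ymax : Int) : Prop :=
  0 ≤ xmax ∧ 0 ≤ ymax ∧ flowers ≠ [] ∧
    ((PySem.Set.ofList (flowers.filter (fun f =>
        decide (0 ≤ f.1 ∧ f.1 ≤ xmax ∧ 0 ≤ f.2 ∧ f.2 ≤ ymax)))).length : Int)
      < (xmax + 1) * (ymax + 1)
instance (flowers : List (Int × Int)) (xmax : Int) (ymax : Int) : Decidable (Pre_locate_busyb flowers xmax ymax) := by unfold Pre_locate_busyb; infer_instance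

def pvWitness_locate_busyb : (List (Int × Int)) × Int × Int := ([(0, 0)], 1, 1)

def Spec_locate_busyb (flowers : List (Int × Int)) (xmax : Int) (ymax : Int) (out : Int × Int) : Prop := out = locate_busyb_alt flowers xmax ymax
instance (flowers : List (Int × Int)) (xmax : Int) (ymax : Int) (out : Int × Int) : Decidable (Spec_locate_busyb flowers xmax ymax out) := by unfold Spec_locate_busyb; infer_instance

-- ===== CLAIM (what is proved, stated in full; the proofs are below) =====
def Claim_equal_locate_busyb : Prop := ∀ (flowers : List (Int × Int)) (xmax : Int) (ymax : Int), Dom_locate_busyb flowers xmax ymax → Pre_locate_busyb flowers xmax ymax → Spec_locate_busyb flowers xmax ymax (locate_busyb flowers xmax ymax)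

-- ===== LEMMAS AND PROOFS =====

-- D coords x = sum of |x - v|, C coords x = how many v are ≤ x
def pvD (coords : List Int) (x : Int) : Int := (coords.map (fun v => |x - v|)).sum
def pvC (coords : List Int) (x : Int) : Int := (coords.countP (fun v => decide (v ≤ x)) : Int)

lemma pvD_step (coords : List Int) (x : Int) :
    pvD coords x = pvD coords (x - 1) + 2 * pvC coords (x - 1) - coords.length := by
  induction coords with
  | nil => simp [pvD, pvC]
  | cons v t ih =>
    have habs : |x - v| = |x - 1 - v| + (if v ≤ x - 1 then 1 else -1) := by
      by_cases h : v ≤ x - 1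
      · rw [if_pos h, abs_of_nonneg (by omega), abs_of_nonneg (by omega)]; omega
      · rw [if_neg h, abs_of_nonpos (by omega), abs_of_nonpos (by omega)]; ring
    simp only [pvD, pvC, List.map_cons, List.sum_cons, List.countP_cons, List.length_cons] at habs ih ⊢
    by_cases h : v ≤ x - 1
    · simp only [h, if_true, decide_true] at habs ⊢
      push_cast
      linarith [habs, ih]
    · simp only [h, if_false, decide_false] at habs ⊢
      push_cast
      linarith [habs, ih]

lemma pvC_step (coords : List Int) (x : Int) :
    pvC coords x = pvC coords (x - 1) + coords.count x := by
  induction coords with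
  | nil => simp [pvC]
  | cons v t ih =>
    simp only [pvC, List.countP_cons, List.count_cons] at ih ⊢
    by_cases h1 : v ≤ x - 1
    · have h2 : v ≤ x := by omega
      have h3 : ¬ (v = x) := by omega
      simp only [h1, h2, h3, decide_true, if_true, if_false, beq_iff_eq]
      push_cast
      linarith [ih]
    · by_cases h2 : v = x
      · subst h2
        simp only [h1, le_refl, decide_true, decide_false, if_true, beq_self_eq_true]
        push_cast
        linarith [ih]
      · have h4 : ¬ (v ≤ x) := by omega
        have h5 : ¬ (v = x) := by omega
        simp only [h1, h4, h5, decide_false, if_false, beq_iff_eq]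
        push_cast
        linarith [ih]

lemma pvAxis_inv (coords : List Int) (cnt : PySem.Dict Int Int)
    (hc : ∀ v, cnt.getD v 0 = coords.count v) :
    ∀ (k : Nat) (a : Int) (acc : List Int),
      ((PySem.List.pyRange a (a + k) 1).foldl
        (fun (st : Int × Int × List Int) x =>
          (st.1 + 2 * st.2.1 - (coords.length : Int), st.2.1 + cnt.getD x 0,
            st.2.2 ++ [st.1 + 2 * st.2.1 - (coords.length : Int)]))
        (pvD coords (a - 1), pvC coords (a - 1), acc)).2.2
      = acc ++ (List.range k).map (fun (i : Nat) => pvD coords (a + (i : Int))) := by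
  intro k
  induction k with
  | zero =>
    intro a acc
    rw [show a + ((0 : Nat) : Int) = a by push_cast; ring,
        PySem.List.pyRange_one_eq_nil le_rfl]
    simp
  | succ k ih =>
    intro a acc
    rw [PySem.List.pyRange_one_cons (by push_cast; omega : a < a + ((k + 1 : Nat) : Int))]
    simp only [List.foldl_cons]
    have hs : pvD coords (a - 1) + 2 * pvC coords (a - 1) - (coords.length : Int)
        = pvD coords a := by linarith [pvD_step coords a]
    have hcc : pvC coords (a - 1) + cnt.getD a 0 = pvC coords a := by
      rw [hc a]; linarith [pvC_step coords a]
    rw [show a + ((k + 1 : Nat) : Int) = (a + 1) + (k : Nat) by push_cast; ring]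
    rw [hs, hcc]
    have ih' := ih (a + 1) (acc ++ [pvD coords a])
    rw [show a + 1 - 1 = a by ring] at ih'
    rw [ih']
    rw [List.append_assoc]
    congr 1
    rw [List.range_succ_eq_map, List.map_cons, List.map_map, List.singleton_append]
    congr 1
    · congr 1
      push_cast
      ring
    · apply List.map_congr_left
      intro i _
      simp only [Function.comp_apply]
      congr 1
      push_cast
      ring

-- the Array fold of pvAxisSums seen through toList is the corresponding List fold
lemma pvArrFold (cnt : PySem.Dict Int Int) (n : Int) (r : List Int) :
    ∀ (s c : Int) (arr : Array Int),
      ((r.foldl (fun (st : Int × Int × Array Int) x =>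
          (st.1 + 2 * st.2.1 - n, st.2.1 + cnt.getD x 0, st.2.2.push (st.1 + 2 * st.2.1 - n)))
        (s, c, arr)).2.2).toList
      = (r.foldl (fun (st : Int × Int × List Int) x =>
          (st.1 + 2 * st.2.1 - n, st.2.1 + cnt.getD x 0, st.2.2 ++ [st.1 + 2 * st.2.1 - n]))
        (s, c, arr.toList)).2.2 := by
  induction r with
  | nil => intro s c arr; rfl
  | cons x t ih =>
    intro s c arr
    simp only [List.foldl_cons]
    rw [ih, Array.toList_push]

lemma pvArrGetD (a : Array Int) (n : Nat) (d : Int) : a.getD n d = a.toList.getD n d := by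
  simp [Array.getD, List.getD]
  split
  · simp [*]
  · simp [*]

lemma pvAxisSums_eq (coords : List Int) (cnt : PySem.Dict Int Int) (mx : Int)
    (hc : ∀ v, cnt.getD v 0 = coords.count v) (hmx : 0 ≤ mx) :
    (pvAxisSums cnt (coords.length : Int) mx coords).toList
      = (List.range (mx.toNat + 1)).map (fun (i : Nat) => pvD coords (i : Int)) := by
  have h0 : (coords.map (fun v => |v|)).sum = pvD coords 0 := by
    simp [pvD, zero_sub, abs_neg]
  have hc0 : ((coords.filter (fun v => decide (v ≤ 0))).length : Int) = pvC coords 0 := by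
    simp [pvC, List.countP_eq_length_filter]
  have key := pvAxis_inv coords cnt hc mx.toNat 1 [pvD coords 0]
  rw [show (1 : Int) - 1 = 0 by ring] at key
  unfold pvAxisSums
  simp only []
  rw [pvArrFold, show (#[(coords.map (fun v => |v|)).sum] : Array Int).toList
        = [(coords.map (fun v => |v|)).sum] from rfl]
  rw [h0, hc0, show mx + 1 = 1 + ((mx.toNat : Nat) : Int) by omega, key,
      List.range_succ_eq_map, List.map_cons, List.map_map, List.singleton_append]
  congr 1
  apply List.map_congr_left
  intro i _
  simp only [Function.comp_apply]
  congr 1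
  push_cast
  ring

lemma pvAxisSums_get (coords : List Int) (cnt : PySem.Dict Int Int) (n mx x : Int)
    (hn : n = (coords.length : Int))
    (hc : ∀ v, cnt.getD v 0 = coords.count v) (hx : 0 ≤ x) (hxm : x ≤ mx) :
    pvIdx (pvAxisSums cnt n mx coords) x = pvD coords x := by
  subst hn
  rw [pvIdx, pvArrGetD, pvAxisSums_eq coords cnt mx hc (by omega),
      PySem.List.getD_map_range _ _ _ _ (by omega : x.toNat < mx.toNat + 1),
      Int.toNat_of_nonneg hx]

lemma totalA_eq (flowers : List (Int × Int)) (x y : Int) :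
    (PySem.List.pyRange 0 (PySem.List.len flowers) 1).foldl
        (fun (total : Int) i =>
          let distance := |x - (PySem.List.pyGetD flowers i (0, 0)).1|
                        + |y - (PySem.List.pyGetD flowers i (0, 0)).2|
          total + distance) 0
      = pvD (flowers.map (fun f => f.1)) x + pvD (flowers.map (fun f => f.2)) y := by
  have hfold := PySem.List.foldl_add (PySem.List.pyRange 0 (PySem.List.len flowers) 1)
    (fun i => |x - (PySem.List.pyGetD flowers i (0, 0)).1|
            + |y - (PySem.List.pyGetD flowers i (0, 0)).2|) 0
  simp only [] at hfold ⊢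
  rw [hfold, zero_add,
      show (fun i => |x - (PySem.List.pyGetD flowers i (0, 0)).1|
            + |y - (PySem.List.pyGetD flowers i (0, 0)).2|)
          = (fun f : Int × Int => |x - f.1| + |y - f.2|)
              ∘ (fun j => PySem.List.pyGetD flowers j (0, 0)) from rfl,
      ← List.map_map, PySem.List.map_pyGetD_pyRange_zero,
      PySem.List.sum_map_add_int flowers (fun f => |x - f.1|) (fun f => |y - f.2|)]
  simp [pvD, List.map_map, Function.comp_def]

-- ===== VERDICT (by name: the statement is the Claim_ definition above) =====
theorem locate_busyb_spec : Claim_equal_locate_busyb := by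
  intro flowers xmax ymax hdom hpre
  obtain ⟨hx0, hy0, -, -⟩ := hpre
  unfold Spec_locate_busyb locate_busyb locate_busyb_alt
  simp only []
  rw [PySem.List.foldl_prod_mk
        (f := fun (d : PySem.Dict Int Int) (f : Int × Int) => d.insert f.1 (d.getD f.1 0 + 1))
        (g := fun (d : PySem.Dict Int Int) (f : Int × Int) => d.insert f.2 (d.getD f.2 0 + 1))]
  have hc1 : ∀ v, (flowers.foldl
      (fun (d : PySem.Dict Int Int) (f : Int × Int) => d.insert f.1 (d.getD f.1 0 + 1))
      PySem.Dict.empty).getD v 0 = (flowers.map (fun f => f.1)).count v := by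
    intro v
    rw [← List.foldl_map (f := fun f : Int × Int => f.1)
          (g := fun (d : PySem.Dict Int Int) x => d.insert x (d.getD x 0 + 1)),
        PySem.Dict.getD_foldl_insert_add_one, PySem.Dict.getD_empty, zero_add]
  have hc2 : ∀ v, (flowers.foldl
      (fun (d : PySem.Dict Int Int) (f : Int × Int) => d.insert f.2 (d.getD f.2 0 + 1))
      PySem.Dict.empty).getD v 0 = (flowers.map (fun f => f.2)).count v := by
    intro v
    rw [← List.foldl_map (f := fun f : Int × Int => f.2)
          (g := fun (d : PySem.Dict Int Int) x => d.insert x (d.getD x 0 + 1)),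
        PySem.Dict.getD_foldl_insert_add_one, PySem.Dict.getD_empty, zero_add]
  congr 2
  apply PySem.List.foldl_congr_mem
  intro st y hymem
  apply PySem.List.foldl_congr_mem
  intro st2 x hxmem
  rw [PySem.List.mem_pyRange_one] at hymem hxmem
  by_cases hmem : (x, y) ∈ flowers
  · rw [if_neg (not_not_intro hmem),
        if_neg (not_not_intro ((PySem.Set.mem_ofList flowers (x, y)).mpr hmem))]
  · rw [if_pos hmem,
        if_pos (fun h => hmem ((PySem.Set.mem_ofList flowers (x, y)).mp h))]
    simp only []
    rw [totalA_eq flowers x y,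
        pvAxisSums_get (flowers.map (fun f => f.1)) _ _ xmax x (by simp [PySem.List.len_eq]) hc1
          (by omega) (by omega),
        pvAxisSums_get (flowers.map (fun f => f.2)) _ _ ymax y (by simp [PySem.List.len_eq]) hc2
          (by omega) (by omega)]
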